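-- pv_equiv track=rewrite | github.com/ThanhChinhBK/trankit | trankit/utils/prd_tree_utils.py | guess_space_after_non_english
-- ===== SOURCE A (Python) =====
-- NO_SPACE_BEFORE = {"-RRB-", "-RCB-", "-RSB-", "''"} | set("%.,!?:;")
--
-- NO_SPACE_AFTER = {"-LRB-", "-LCB-", "-LSB-", "``", "`"} | set("$#")
--
-- PTB_DASH_ESCAPED = {"-RRB-", "-RCB-", "-RSB-", "-LRB-", "-LCB-", "-LSB-", "--"}
--
-- def guess_space_after_non_english(escaped_words):
--     sp_after = [True for _ in escaped_words]
--     for i, word in enumerate(escaped_words):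
--         if i > 0 and (
--                 (
--                         word.startswith("-")
--                         and not any(word.startswith(x) for x in PTB_DASH_ESCAPED)
--                 )
--                 or any(word.startswith(x) for x in NO_SPACE_BEFORE)
--                 or word == "'"
--         ):
--             sp_after[i - 1] = False
--         if (
--                 word.endswith("-") and not any(word.endswith(x) for x in PTB_DASH_ESCAPED)
--         ) or any(word.endswith(x) for x in NO_SPACE_AFTER):
--             sp_after[i] = False
--
--     return sp_after
-- ===== SOURCE B (Python) =====
-- NO_SPACE_BEFORE = {"-RRB-", "-RCB-", "-RSB-", "''"} | set("%.,!?:;")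
--
-- NO_SPACE_AFTER = {"-LRB-", "-LCB-", "-LSB-", "``", "`"} | set("$#")
--
-- PTB_DASH_ESCAPED = {"-RRB-", "-RCB-", "-RSB-", "-LRB-", "-LCB-", "-LSB-", "--"}
--
--
-- def _after_break(w):
--     return (w.endswith("-") and not any(w.endswith(x) for x in PTB_DASH_ESCAPED)) \
--         or any(w.endswith(x) for x in NO_SPACE_AFTER)
--
--
-- def _before_break(w):
--     return (w.startswith("-") and not any(w.startswith(x) for x in PTB_DASH_ESCAPED)) \
--         or any(w.startswith(x) for x in NO_SPACE_BEFORE) \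
--         or w == "'"
--
--
-- def guess_space_after_non_english(escaped_words):
--     # single reverse scan carrying one bit: whether the word to the RIGHT
--     # forbids a space before itself; no index arithmetic, no in-place clearing
--     out = []
--     right_glues = False
--     for w in reversed(escaped_words):
--         out.append(not (_after_break(w) or right_glues))
--         right_glues = _before_break(w)
--     out.reverse()
--     return out
-- ===== Notes on version B (the rewrite author's own statement) =====
-- stated objective: alternative
-- what changed: Replaces the forward indexed loop that mutates sp_after[i-1]/sp_after[i] in place with a single reverse scan carrying one accumulator bit (whether the right neighbour forbids a preceding space), building the output back-to-front and reversing once.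
import Mathlib
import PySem

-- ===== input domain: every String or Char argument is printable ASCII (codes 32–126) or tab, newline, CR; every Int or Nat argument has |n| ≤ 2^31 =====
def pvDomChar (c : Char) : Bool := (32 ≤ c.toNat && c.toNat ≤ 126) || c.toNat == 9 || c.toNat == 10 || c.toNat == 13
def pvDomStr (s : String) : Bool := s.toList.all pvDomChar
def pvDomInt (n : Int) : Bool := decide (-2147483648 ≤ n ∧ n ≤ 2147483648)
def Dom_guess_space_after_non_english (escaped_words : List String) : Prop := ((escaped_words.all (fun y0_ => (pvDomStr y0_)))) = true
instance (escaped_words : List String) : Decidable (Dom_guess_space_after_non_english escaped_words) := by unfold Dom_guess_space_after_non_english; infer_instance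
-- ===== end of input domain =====

-- B replaces A's forward loop with in-place clearing of sp_after[i-1]/sp_after[i] by a single
-- reverse scan carrying one accumulator bit (alternative decomposition, same cost).

-- ===== PORT A =====
def pvNoSpaceBefore : List String := ["-RRB-", "-RCB-", "-RSB-", "''", "%", ".", ",", "!", "?", ":", ";"]
def pvNoSpaceAfter : List String := ["-LRB-", "-LCB-", "-LSB-", "``", "`", "$", "#"]
def pvPtbDashEscaped : List String := ["-RRB-", "-RCB-", "-RSB-", "-LRB-", "-LCB-", "-LSB-", "--"]

def guess_space_after_non_english (escaped_words : List String) : List Bool :=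
  let sp_after := escaped_words.map (fun _ => true)
  (PySem.List.enumerate escaped_words).foldl
    (fun sp_after iw =>
      let i := iw.1
      let word := iw.2
      let sp_after :=
        if i > 0 ∧
            ((PySem.Str.startswith word "-" = true ∧
              ¬ (pvPtbDashEscaped.any (fun x => PySem.Str.startswith word x)) = true) ∨
             (pvNoSpaceBefore.any (fun x => PySem.Str.startswith word x)) = true ∨
             word = "'") then
          sp_after.set (i - 1).toNat false
        else sp_after
      if (PySem.Str.endswith word "-" = true ∧
            ¬ (pvPtbDashEscaped.any (fun x => PySem.Str.endswith word x)) = true) ∨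
          (pvNoSpaceAfter.any (fun x => PySem.Str.endswith word x)) = true then
        sp_after.set i.toNat false
      else sp_after)
    sp_after

-- ===== PORT B =====
-- B-side helper: word ends so that no space follows it
def pvAB (w : String) : Bool :=
  (PySem.Str.endswith w "-" && !(pvPtbDashEscaped.any (fun x => PySem.Str.endswith w x)))
  || pvNoSpaceAfter.any (fun x => PySem.Str.endswith w x)

-- B-side helper: word starts so that no space precedes it
def pvBB (w : String) : Bool :=
  (PySem.Str.startswith w "-" && !(pvPtbDashEscaped.any (fun x => PySem.Str.startswith w x)))
  || pvNoSpaceBefore.any (fun x => PySem.Str.startswith w x)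
  || w == "'"

def guess_space_after_non_english_alt (escaped_words : List String) : List Bool :=
  let r := escaped_words.reverse.foldl
    (fun acc w => (acc.1 ++ [!(pvAB w || acc.2)], pvBB w))
    (([] : List Bool), false)
  r.1.reverse

-- ===== PRECONDITION & SPEC =====
def Spec_guess_space_after_non_english (escaped_words : List String) (out : List Bool) : Prop := out = guess_space_after_non_english_alt escaped_words
instance (escaped_words : List String) (out : List Bool) : Decidable (Spec_guess_space_after_non_english escaped_words out) := by unfold Spec_guess_space_after_non_english; infer_instance

-- ===== CLAIM (what is proved, stated in full; the proofs are below) =====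
def Claim_equal_guess_space_after_non_english : Prop := ∀ (escaped_words : List String), Dom_guess_space_after_non_english escaped_words → Spec_guess_space_after_non_english escaped_words (guess_space_after_non_english escaped_words)

-- ===== LEMMAS AND PROOFS =====

-- common characterisation: output from position i-1 on, given sp_after[i-1] = prev
def pvH (prev : Bool) : List String → List Bool
  | [] => [prev]
  | w :: ws => (prev && !pvBB w) :: pvH (!pvAB w) ws

-- the body of A's fold, named
def pvStepA (sp : List Bool) (iw : Int × String) : List Bool :=
  let i := iw.1
  let word := iw.2
  let sp :=
    if i > 0 ∧
        ((PySem.Str.startswith word "-" = true ∧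
          ¬ (pvPtbDashEscaped.any (fun x => PySem.Str.startswith word x)) = true) ∨
         (pvNoSpaceBefore.any (fun x => PySem.Str.startswith word x)) = true ∨
         word = "'") then
      sp.set (i - 1).toNat false
    else sp
  if (PySem.Str.endswith word "-" = true ∧
        ¬ (pvPtbDashEscaped.any (fun x => PySem.Str.endswith word x)) = true) ∨
      (pvNoSpaceAfter.any (fun x => PySem.Str.endswith word x)) = true then
    sp.set i.toNat false
  else sp

-- the body of B's fold, named
def pvStepB (acc : List Bool × Bool) (w : String) : List Bool × Bool :=
  (acc.1 ++ [!(pvAB w || acc.2)], pvBB w)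

lemma pvBB_iff (w : String) :
    ((PySem.Str.startswith w "-" = true ∧
        ¬ (pvPtbDashEscaped.any (fun x => PySem.Str.startswith w x)) = true) ∨
      (pvNoSpaceBefore.any (fun x => PySem.Str.startswith w x)) = true ∨ w = "'")
      ↔ pvBB w = true := by
  simp only [pvBB, Bool.or_eq_true, Bool.and_eq_true, Bool.not_eq_true', Bool.not_eq_true,
    beq_iff_eq]
  tauto

lemma pvAB_iff (w : String) :
    ((PySem.Str.endswith w "-" = true ∧
        ¬ (pvPtbDashEscaped.any (fun x => PySem.Str.endswith w x)) = true) ∨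
      (pvNoSpaceAfter.any (fun x => PySem.Str.endswith w x)) = true)
      ↔ pvAB w = true := by
  simp only [pvAB, Bool.or_eq_true, Bool.and_eq_true, Bool.not_eq_true', Bool.not_eq_true]

lemma pvStepA_pos (pre : List Bool) (prev : Bool) (rest : List Bool) (i : Nat) (w : String)
    (hlen : pre.length = i) :
    pvStepA (pre ++ prev :: true :: rest) ((i : Int) + 1, w)
      = pre ++ (prev && !pvBB w) :: (!pvAB w) :: rest := by
  have hset1 : ∀ b : Bool, (pre ++ prev :: b :: rest).set i false = pre ++ false :: b :: rest := by
    intro b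
    rw [List.set_append_right _ _ (by omega)]
    simp [hlen]
  have hset2 : ∀ a : Bool, (pre ++ a :: true :: rest).set (i + 1) false
      = pre ++ a :: false :: rest := by
    intro a
    rw [List.set_append_right _ _ (by omega)]
    simp [hlen, List.set]
  have h1 : ((i : Int) + 1 - 1).toNat = i := by omega
  have h2 : ((i : Int) + 1).toNat = i + 1 := by omega
  have e1 : ((i : Int) + 1 > 0 ∧
      ((PySem.Str.startswith w "-" = true ∧
          ¬ (pvPtbDashEscaped.any (fun x => PySem.Str.startswith w x)) = true) ∨
        (pvNoSpaceBefore.any (fun x => PySem.Str.startswith w x)) = true ∨ w = "'"))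
      ↔ pvBB w = true := by
    rw [← pvBB_iff]
    exact ⟨And.right, fun h => ⟨by omega, h⟩⟩
  unfold pvStepA
  simp only [h1, h2, e1, pvAB_iff]
  cases hb : pvBB w <;> cases ha : pvAB w <;>
    simp [hset1, hset2]

lemma foldA_inv (ws : List String) : ∀ (i : Nat) (pre : List Bool) (prev : Bool),
    pre.length = i →
    (PySem.List.enumerate ws ((i : Int) + 1)).foldl pvStepA
        (pre ++ prev :: ws.map (fun _ => true))
      = pre ++ pvH prev ws := by
  induction ws with
  | nil => intro i pre prev _; simp [pvH, PySem.List.enumerate]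
  | cons w rest ih =>
    intro i pre prev hlen
    rw [PySem.List.enumerate_cons]
    simp only [List.map_cons, List.foldl_cons]
    rw [pvStepA_pos pre prev (rest.map (fun _ => true)) i w hlen]
    have : pre ++ (prev && !pvBB w) :: (!pvAB w) :: rest.map (fun _ => true)
        = (pre ++ [prev && !pvBB w]) ++ (!pvAB w) :: rest.map (fun _ => true) := by simp
    rw [this]
    have hlen' : (pre ++ [prev && !pvBB w]).length = i + 1 := by simp [hlen]
    have hcast : (i : Int) + 1 + 1 = ((i + 1 : Nat) : Int) + 1 := by push_cast; ring
    rw [hcast, ih (i + 1) _ (!pvAB w) hlen']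
    simp [pvH]

lemma A_eq_H : ∀ ws : List String, guess_space_after_non_english ws
    = match ws with | [] => [] | w :: rest => pvH (!pvAB w) rest := by
  intro ws
  cases ws with
  | nil => simp [guess_space_after_non_english, PySem.List.enumerate]
  | cons w rest =>
    show (PySem.List.enumerate (w :: rest) 0).foldl pvStepA ((w :: rest).map (fun _ => true)) = _
    rw [PySem.List.enumerate_cons]
    simp only [List.map_cons, List.foldl_cons]
    have h0 : pvStepA (true :: rest.map (fun _ => true)) (0, w)
        = (!pvAB w) :: rest.map (fun _ => true) := by
      unfold pvStepA
      have hc1 : ¬(((0 : Int) > 0) ∧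
          ((PySem.Str.startswith w "-" = true ∧
              ¬ (pvPtbDashEscaped.any (fun x => PySem.Str.startswith w x)) = true) ∨
            (pvNoSpaceBefore.any (fun x => PySem.Str.startswith w x)) = true ∨ w = "'")) :=
        fun h => by omega
      simp only [if_neg hc1, pvAB_iff]
      cases ha : pvAB w <;> simp
    rw [h0]
    have := foldA_inv rest 0 [] (!pvAB w) rfl
    simpa using this

lemma foldB_inv : ∀ ws : List String,
    (ws.reverse.foldl pvStepB (([] : List Bool), false)).1.reverse
        = (match ws with | [] => [] | w :: rest => pvH (!pvAB w) rest)
    ∧ (ws.reverse.foldl pvStepB (([] : List Bool), false)).2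
        = (match ws with | [] => false | w :: _ => pvBB w) := by
  intro ws
  induction ws with
  | nil => simp
  | cons w rest ih =>
    obtain ⟨ih1, ih2⟩ := ih
    have hsplit : (w :: rest).reverse.foldl pvStepB (([] : List Bool), false)
        = pvStepB (rest.reverse.foldl pvStepB (([] : List Bool), false)) w := by
      rw [List.reverse_cons, List.foldl_append]; rfl
    rw [hsplit]
    generalize hp : rest.reverse.foldl pvStepB (([] : List Bool), false) = p at ih1 ih2
    refine ⟨?_, rfl⟩
    show (p.1 ++ [!(pvAB w || p.2)]).reverse = _
    rw [List.reverse_append, ih1, ih2]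
    cases rest with
    | nil => simp [pvH]
    | cons w' r => simp [pvH, Bool.not_or]

lemma B_eq_H : ∀ ws : List String, guess_space_after_non_english_alt ws
    = match ws with | [] => [] | w :: rest => pvH (!pvAB w) rest := by
  intro ws
  have := (foldB_inv ws).1
  simpa [guess_space_after_non_english_alt, pvStepB] using this

-- ===== VERDICT (by name: the statement is the Claim_ definition above) =====
theorem guess_space_after_non_english_spec : Claim_equal_guess_space_after_non_english := by
  intro ws _
  unfold Spec_guess_space_after_non_english
  rw [A_eq_H, B_eq_H]
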